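-- pv_equiv track=rewrite | github.com/MarcusJoha/IDATT2505-Sikkerhet-kryptografi | oblig_10/oppg2.py | find_primitive_element
-- ===== SOURCE A (Python) =====
-- def gcd(a, b) -> int:
--         r = a%b
--         while(r):
--             a = b
--             b = r
--             r = a%b
--         return b
--
-- def find_primitive_element(z_range: int):
--     prim_el = lambda a, k: (a**k)%k
--     prim_el_list = []
--     for i in range(1, z_range):
--         for j in range(1, z_range):
--             pri_el = prim_el(i,j)
--             gcd_calc = gcd(j,z_range-1)
--             if (pri_el == 0 and gcd_calc == 1):
--                 pair = "({}^{})%{}={} og gcd({},{})={}\n".format(i,j,j,pri_el,j,z_range-1,gcd_calc)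
--                 prim_el_list.append(pair)
--     return prim_el_list
-- ===== SOURCE B (Python) =====
-- def gcd(a, b) -> int:
--     r = a % b
--     return b if r == 0 else gcd(b, r)
--
--
-- def find_primitive_element(z_range: int):
--     m = z_range - 1
--     coprime_js = [j for j in range(1, z_range) if gcd(j, m) == 1]
--     result = []
--     for i in range(1, z_range):
--         for j in coprime_js:
--             if pow(i, j, j) == 0:
--                 result.append("({}^{})%{}=0 og gcd({},{})=1\n".format(i, j, j, j, m))
--     return result
-- ===== Notes on version B (the rewrite author's own statement) =====
-- stated objective: faster
-- what changed: B precomputes the coprime-j table once (one gcd pass instead of one gcd per (i,j) pair), uses three-argument pow instead of computing the full bignum power, and emits the format string with the constant residue/gcd values the condition forces.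
import Mathlib
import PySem

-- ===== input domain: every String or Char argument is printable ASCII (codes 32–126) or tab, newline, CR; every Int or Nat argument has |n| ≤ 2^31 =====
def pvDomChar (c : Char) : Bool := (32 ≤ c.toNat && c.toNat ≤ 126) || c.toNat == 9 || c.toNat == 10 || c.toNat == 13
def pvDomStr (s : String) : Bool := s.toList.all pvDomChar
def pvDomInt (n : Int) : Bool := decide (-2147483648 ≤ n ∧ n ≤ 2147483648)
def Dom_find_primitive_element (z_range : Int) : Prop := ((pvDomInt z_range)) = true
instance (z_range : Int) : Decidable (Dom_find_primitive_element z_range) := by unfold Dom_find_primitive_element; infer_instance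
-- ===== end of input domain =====

-- B precomputes the coprime-j table once and replaces the full power i**j by modular exponentiation
-- pow(i, j, j) (objective: faster); the return value is proved equal to A's on every input.

-- Python's % strictly shrinks |r| while r ≠ 0 (termination measure of both gcd ports)
theorem pvModShrink (b r : Int) (h : r ≠ 0) :
    (PySem.Int.mod b r).natAbs < r.natAbs := by
  rcases lt_or_gt_of_ne h with hneg | hpos
  · have := PySem.Int.mod_neg_bounds b hneg
    omega
  · have h1 := PySem.Int.mod_nonneg b hpos
    have h2 := PySem.Int.mod_lt b hpos
    omega

-- ===== PORT A =====
-- A's gcd: 'r = a%b; while r: a = b; b = r; r = a%b; return b' — loop state (b, r)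
def gcdLoopA (b r : Int) : Int :=
  if _h : r = 0 then b
  else gcdLoopA r (PySem.Int.mod b r)
termination_by r.natAbs
decreasing_by exact pvModShrink b r _h

def gcdA (a b : Int) : Int := gcdLoopA b (PySem.Int.mod a b)

-- "({}^{})%{}={} og gcd({},{})={}\n".format(i, j, j, pri_el, j, m, gcd_calc)
def fmtA (i j m pri g : Int) : String :=
  String.mk ("(".toList ++ PySem.Int.toChars i ++ "^".toList ++ PySem.Int.toChars j
    ++ ")%".toList ++ PySem.Int.toChars j ++ "=".toList ++ PySem.Int.toChars pri
    ++ " og gcd(".toList ++ PySem.Int.toChars j ++ ",".toList ++ PySem.Int.toChars m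
    ++ ")=".toList ++ PySem.Int.toChars g ++ "\n".toList)

def find_primitive_element (z_range : Int) : List String :=
  (PySem.List.pyRange 1 z_range 1).foldl (fun acc i =>
    (PySem.List.pyRange 1 z_range 1).foldl (fun acc j =>
      let pri_el := PySem.Int.mod (i ^ j.toNat) j
      let gcd_calc := gcdA j (z_range - 1)
      if pri_el = 0 ∧ gcd_calc = 1 then
        acc ++ [fmtA i j (z_range - 1) pri_el gcd_calc]
      else acc) acc) []

-- ===== PORT B =====
-- B's gcd: 'r = a % b; return b if r == 0 else gcd(b, r)'
def gcdB (a b : Int) : Int :=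
  if _h : PySem.Int.mod a b = 0 then b
  else gcdB b (PySem.Int.mod a b)
termination_by (PySem.Int.mod a b).natAbs
decreasing_by exact pvModShrink b (PySem.Int.mod a b) _h

-- "({}^{})%{}=0 og gcd({},{})=1\n".format(i, j, j, j, m)
def fmtB (i j m : Int) : String :=
  String.mk ("(".toList ++ PySem.Int.toChars i ++ "^".toList ++ PySem.Int.toChars j
    ++ ")%".toList ++ PySem.Int.toChars j ++ "=0 og gcd(".toList ++ PySem.Int.toChars j
    ++ ",".toList ++ PySem.Int.toChars m ++ ")=1\n".toList)

def find_primitive_element_alt (z_range : Int) : List String :=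
  let m := z_range - 1
  let coprime_js := (PySem.List.pyRange 1 z_range 1).filter (fun j => gcdB j m == 1)
  (PySem.List.pyRange 1 z_range 1).foldl (fun acc i =>
    coprime_js.foldl (fun acc j =>
      if PySem.Int.powMod i j.toNat j = 0 then acc ++ [fmtB i j m] else acc) acc) []

-- ===== PRECONDITION & SPEC =====
def Spec_find_primitive_element (z_range : Int) (out : List String) : Prop := out = find_primitive_element_alt z_range
instance (z_range : Int) (out : List String) : Decidable (Spec_find_primitive_element z_range out) := by unfold Spec_find_primitive_element; infer_instance

-- ===== CLAIM (what is proved, stated in full; the proofs are below) =====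
def Claim_equal_find_primitive_element : Prop := ∀ (z_range : Int), Dom_find_primitive_element z_range → Spec_find_primitive_element z_range (find_primitive_element z_range)

-- ===== LEMMAS AND PROOFS =====

theorem gcdLoopA_eq_gcdB (b r : Int) (h : r ≠ 0) : gcdLoopA b r = gcdB b r := by
  rw [gcdLoopA, dif_neg h]
  by_cases h2 : PySem.Int.mod b r = 0
  · rw [gcdLoopA, dif_pos h2, gcdB, dif_pos h2]
  · rw [gcdLoopA_eq_gcdB r _ h2]
    conv_rhs => rw [gcdB, dif_neg h2]
termination_by r.natAbs
decreasing_by exact pvModShrink b r h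

theorem gcdA_eq_gcdB (a b : Int) : gcdA a b = gcdB a b := by
  unfold gcdA
  by_cases h : PySem.Int.mod a b = 0
  · rw [h, gcdLoopA, gcdB]
    simp [h]
  · rw [gcdLoopA_eq_gcdB _ _ h]
    conv_rhs => rw [gcdB, dif_neg h]

theorem toDigits_ten_one : Nat.toDigits 10 1 = ['1'] := by rfl

theorem fmtA_eq_fmtB (i j m : Int) : fmtA i j m 0 1 = fmtB i j m := by
  simp [fmtA, fmtB, PySem.Int.toChars, toDigits_ten_one]

-- A's inner loop over range(1, z_range) equals B's inner loop over the coprime table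
theorem inner_eq (i m : Int) (l : List Int) :
    ∀ acc : List String,
    l.foldl (fun acc j =>
      let pri_el := PySem.Int.mod (i ^ j.toNat) j
      let gcd_calc := gcdA j m
      if pri_el = 0 ∧ gcd_calc = 1 then acc ++ [fmtA i j m pri_el gcd_calc] else acc) acc
    = (l.filter (fun j => gcdB j m == 1)).foldl (fun acc j =>
        if PySem.Int.powMod i j.toNat j = 0 then acc ++ [fmtB i j m] else acc) acc := by
  induction l with
  | nil => intro acc; rfl
  | cons j t ihl =>
    intro acc
    simp only [List.foldl_cons, List.filter_cons]
    by_cases hg : gcdB j m = 1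
    · have hgA : gcdA j m = 1 := (gcdA_eq_gcdB j m).trans hg
      rw [if_pos (by simp [hg] : (gcdB j m == 1) = true), List.foldl_cons]
      by_cases hp : PySem.Int.mod (i ^ j.toNat) j = 0
      · have hpB : PySem.Int.powMod i j.toNat j = 0 := hp
        rw [if_pos ⟨hp, hgA⟩, if_pos hpB]
        rw [hp, hgA, fmtA_eq_fmtB]
        exact ihl _
      · have hpB : ¬ PySem.Int.powMod i j.toNat j = 0 := hp
        rw [if_neg (fun hand => hp hand.1), if_neg hpB]
        exact ihl _
    · have hgA : ¬ gcdA j m = 1 := fun hh => hg ((gcdA_eq_gcdB j m).symm.trans hh)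
      rw [if_neg (by simp [hg] : ¬ (gcdB j m == 1) = true), if_neg (fun hand => hgA hand.2)]
      exact ihl _

-- ===== VERDICT (by name: the statement is the Claim_ definition above) =====
theorem find_primitive_element_spec : Claim_equal_find_primitive_element := by
  intro z _
  unfold Spec_find_primitive_element
  have halt : find_primitive_element_alt z =
      (PySem.List.pyRange 1 z 1).foldl (fun acc i =>
        ((PySem.List.pyRange 1 z 1).filter (fun j => gcdB j (z - 1) == 1)).foldl
          (fun acc j =>
            if PySem.Int.powMod i j.toNat j = 0 then acc ++ [fmtB i j (z - 1)] else acc) acc)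
        [] := rfl
  rw [find_primitive_element, halt]
  exact PySem.List.foldl_congr_mem _ _ _ _ (fun acc x _ => inner_eq x (z - 1) (PySem.List.pyRange 1 z 1) acc)
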